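-- pv_equiv track=rewrite | github.com/DPerrySvendsen/COS30002 | T03 Goal Oriented Behaviour and Simple Goal Insistence/T03.py | getUtility3
-- ===== SOURCE A (Python) =====
-- goals = {
--   'Get enough sleep': 3,
--   'Pass exams': 5,
--   'Party hard': 4
-- }
--
-- def getUtility3(goal, outcomes):
--   sideEffects = 0
--   for outcomeGoal, outcomeChange in outcomes.items():
--     if goals[outcomeGoal] + outcomeChange >= 10:
--       return 0
--     elif outcomeGoal != goal:
--       sideEffects += outcomeChange
--   return -outcomes[goal] + sideEffects
-- ===== SOURCE B (Python) =====
-- goals = {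
--   'Get enough sleep': 3,
--   'Pass exams': 5,
--   'Party hard': 4
-- }
--
-- def getUtility3(goal, outcomes):
--   # Recursive cap scan (same left-to-right order and short-circuit as A's loop),
--   # then a closed-form answer: since dict keys are unique,
--   # sum of non-goal changes - outcomes[goal] == sum of all changes - 2*outcomes[goal].
--   def first_cap(items):
--     if not items:
--       return False
--     g, c = items[0]
--     return goals[g] + c >= 10 or first_cap(items[1:])
--   if first_cap(list(outcomes.items())):
--     return 0
--   return sum(outcomes.values()) - 2 * outcomes[goal]
-- ===== Notes on version B (the rewrite author's own statement) =====
-- stated objective: alternative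
-- what changed: A's fused loop with a per-item goal comparison and a running side-effect accumulator is replaced by a recursive short-circuit cap scan plus a closed-form answer sum(values) - 2*outcomes[goal], valid because dict keys are unique; the per-item comparison against goal and the accumulator disappear.
import Mathlib
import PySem

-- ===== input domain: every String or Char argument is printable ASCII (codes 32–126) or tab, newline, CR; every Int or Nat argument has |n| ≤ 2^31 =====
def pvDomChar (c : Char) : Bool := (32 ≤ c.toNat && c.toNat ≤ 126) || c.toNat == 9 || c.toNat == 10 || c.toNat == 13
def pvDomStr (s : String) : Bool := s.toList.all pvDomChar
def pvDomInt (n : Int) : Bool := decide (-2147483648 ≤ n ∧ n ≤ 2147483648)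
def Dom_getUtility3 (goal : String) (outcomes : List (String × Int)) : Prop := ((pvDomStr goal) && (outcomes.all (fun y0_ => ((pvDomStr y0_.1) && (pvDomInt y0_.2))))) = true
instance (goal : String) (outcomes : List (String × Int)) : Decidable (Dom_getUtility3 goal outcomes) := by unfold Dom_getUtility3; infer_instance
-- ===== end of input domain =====

-- B replaces A's fused loop (per-item goal comparison + side-effect accumulator) by a recursive
-- short-circuit cap scan plus the closed form sum(values) - 2*outcomes[goal], valid because dict
-- keys are unique (Pre_ states the nodup-keys fact every Python dict satisfies). Objective: alternative.


-- shared helper: the module-level `goals` dict and its lookup (none = KeyError, excluded by Pre_)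
def pvGoals : List (String × Int) :=
  [("Get enough sleep", 3), ("Pass exams", 5), ("Party hard", 4)]
def pvGoalsGet (k : String) : Option Int := (pvGoals.find? (fun p => p.1 == k)).map (·.2)
-- `outcomes[goal]` (first match; none = KeyError, excluded by Pre_)
def pvOutGet (outcomes : List (String × Int)) (goal : String) : Option Int :=
  (outcomes.find? (fun p => p.1 == goal)).map (·.2)

-- ===== PORT A =====
-- the for-loop over outcomes.items() carrying the sideEffects accumulator;
-- at a missing key (where Python raises KeyError) the lookups default to 0 — excluded by Pre_
def getUtility3Loop (goal : String) (outcomes : List (String × Int)) :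
    List (String × Int) → Int → Int
  | [], sideEffects => -((pvOutGet outcomes goal).getD 0) + sideEffects
  | (g, c) :: rest, sideEffects =>
    if (pvGoalsGet g).getD 0 + c ≥ 10 then 0
    else if g ≠ goal then getUtility3Loop goal outcomes rest (sideEffects + c)
    else getUtility3Loop goal outcomes rest sideEffects

def getUtility3 (goal : String) (outcomes : List (String × Int)) : Int :=
  getUtility3Loop goal outcomes outcomes 0

-- ===== PORT B =====
-- Source B's recursive first_cap: `or` short-circuits left to right exactly like A's loop order
def firstCapB : List (String × Int) → Bool
  | [] => false
  | (g, c) :: rest => decide ((pvGoalsGet g).getD 0 + c ≥ 10) || firstCapB rest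

def getUtility3_alt (goal : String) (outcomes : List (String × Int)) : Int :=
  if firstCapB outcomes then 0
  else (outcomes.map (·.2)).sum - 2 * (pvOutGet outcomes goal).getD 0

-- ===== PRECONDITION & SPEC =====
-- an item caps (triggers the early `return 0`): key present in goals and value + change ≥ 10
def pvCap (p : String × Int) : Bool :=
  match pvGoalsGet p.1 with | some v => decide (v + p.2 ≥ 10) | none => false

-- Pre_ = exactly the inputs on which Python A returns: every item reached before the first capping
-- item has its key in `goals`, and either some item caps (early return 0) or the loop completes
-- and `goal` is a key of outcomes (else `outcomes[goal]` raises KeyError). The Nodup conjunct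
-- excludes nothing A returns on: `outcomes` is a Python dict, whose keys are necessarily distinct,
-- so duplicate-key association lists correspond to no Python input.
def Pre_getUtility3 (goal : String) (outcomes : List (String × Int)) : Prop :=
  (∀ i, i < outcomes.length →
      ((outcomes.take i).all (fun p => !pvCap p)) = true →
      (pvGoalsGet (outcomes.getD i ("", 0)).1).isSome = true)
  ∧ (outcomes.any pvCap = true ∨ goal ∈ outcomes.map (·.1))
  ∧ (outcomes.map (·.1)).Nodup
instance (goal : String) (outcomes : List (String × Int)) : Decidable (Pre_getUtility3 goal outcomes) := by
  unfold Pre_getUtility3; infer_instance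

def pvWitness_getUtility3 : String × (List (String × Int)) :=
  ("Pass exams", [("Pass exams", 2), ("Party hard", 1)])

def Spec_getUtility3 (goal : String) (outcomes : List (String × Int)) (out : Int) : Prop := out = getUtility3_alt goal outcomes
instance (goal : String) (outcomes : List (String × Int)) (out : Int) : Decidable (Spec_getUtility3 goal outcomes out) := by unfold Spec_getUtility3; infer_instance

-- ===== CLAIM (what is proved, stated in full; the proofs are below) =====
def Claim_equal_getUtility3 : Prop := ∀ (goal : String) (outcomes : List (String × Int)), Dom_getUtility3 goal outcomes → Pre_getUtility3 goal outcomes → Spec_getUtility3 goal outcomes (getUtility3 goal outcomes)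

-- ===== LEMMAS AND PROOFS =====
-- A's loop, from any accumulator, characterised: stop at the first cap, else accumulate non-goal changes.
lemma getUtility3Loop_eq (goal : String) (outcomes : List (String × Int)) :
    ∀ (rest : List (String × Int)) (se : Int),
      getUtility3Loop goal outcomes rest se =
        if firstCapB rest then 0
        else se + ((rest.filter (fun p => decide (p.1 ≠ goal))).map (·.2)).sum
             - (pvOutGet outcomes goal).getD 0 := by
  intro rest
  induction rest with
  | nil => intro se; simp [getUtility3Loop, firstCapB]; ring
  | cons p rest ih =>
    intro se
    obtain ⟨g, c⟩ := p
    by_cases hcap : (pvGoalsGet g).getD 0 + c ≥ 10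
    · have ht : firstCapB ((g, c) :: rest) = true := by simp [firstCapB, hcap]
      simp only [getUtility3Loop, if_pos hcap, ht, if_true]
    · have hb : decide ((pvGoalsGet g).getD 0 + c ≥ 10) = false := by simp [hcap]
      simp only [getUtility3Loop, firstCapB, List.filter_cons, hb, Bool.false_or, if_neg hcap]
      rcases eq_or_ne g goal with hg | hg
      · simp [hg, ih]
      · have hgb : decide (g ≠ goal) = true := by simp [hg]
        simp only [if_pos hg, ih, hgb, if_true, List.map_cons, List.sum_cons]
        split
        · rfl
        · ring

-- if goal is not among the keys, the ≠-filter keeps everything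
lemma filter_ne_of_not_mem (goal : String) :
    ∀ (l : List (String × Int)), goal ∉ l.map (·.1) →
      l.filter (fun p => decide (p.1 ≠ goal)) = l := by
  intro l
  induction l with
  | nil => intro _; rfl
  | cons p rest ih =>
    intro h
    simp only [List.map_cons, List.mem_cons, not_or] at h
    have hne : decide (p.1 ≠ goal) = true := by simp; exact fun e => h.1 e.symm
    rw [List.filter_cons]
    simp only [hne, if_true, ih h.2]

-- with distinct keys and goal present, the non-goal sum is total minus the goal's value
lemma filter_sum_eq (goal : String) :
    ∀ (l : List (String × Int)), (l.map (·.1)).Nodup → goal ∈ l.map (·.1) →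
      ((l.filter (fun p => decide (p.1 ≠ goal))).map (·.2)).sum
        = (l.map (·.2)).sum - (pvOutGet l goal).getD 0 := by
  intro l
  induction l with
  | nil => intro _ h; simp at h
  | cons p rest ih =>
    intro hnd hmem
    obtain ⟨g, c⟩ := p
    simp only [List.map_cons, List.nodup_cons] at hnd
    rcases eq_or_ne g goal with hg | hg
    · subst hg
      have hkeep := filter_ne_of_not_mem g rest hnd.1
      have hf : decide ((g, c).1 ≠ g) = false := by simp
      rw [List.filter_cons]
      simp only [hf, Bool.false_eq_true, if_false, hkeep, pvOutGet, List.find?_cons]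
      simp
    · have hmem' : goal ∈ rest.map (·.1) := by
        simp only [List.map_cons, List.mem_cons] at hmem
        rcases hmem with h | h
        · exact absurd h.symm hg
        · exact h
      have : decide ((g, c).1 ≠ goal) = true := by simp [hg]
      have hfind : ((g, c).1 == goal) = false := by simp [hg]
      simp only [List.filter_cons, this, if_true, List.map_cons, List.sum_cons,
        ih hnd.2 hmem', pvOutGet, List.find?_cons, hfind]
      ring

-- a pvCap item also trips firstCapB's condition
lemma firstCapB_of_any_cap :
    ∀ (l : List (String × Int)), l.any pvCap = true → firstCapB l = true := by
  intro l
  induction l with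
  | nil => intro h; simp at h
  | cons p rest ih =>
    intro h
    obtain ⟨g, c⟩ := p
    simp only [List.any_cons, Bool.or_eq_true] at h
    rcases h with h | h
    · unfold pvCap at h
      cases hv : pvGoalsGet g with
      | none => rw [hv] at h; simp at h
      | some v =>
        rw [hv] at h; simp at h
        simp [firstCapB, hv, h]
    · simp [firstCapB, ih h]

-- ===== VERDICT (by name: the statement is the Claim_ definition above) =====
theorem getUtility3_spec : Claim_equal_getUtility3 := by
  intro goal outcomes _ hpre
  obtain ⟨_, hret, hnd⟩ := hpre
  unfold Spec_getUtility3 getUtility3 getUtility3_alt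
  rw [getUtility3Loop_eq]
  cases hfc : firstCapB outcomes with
  | true => simp
  | false =>
    have hmem : goal ∈ outcomes.map (·.1) := by
      rcases hret with h | h
      · exact absurd (firstCapB_of_any_cap outcomes h) (by simp [hfc])
      · exact h
    simp only [if_false, Bool.false_eq_true, filter_sum_eq goal outcomes hnd hmem]
    ring
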